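-- pv_equiv track=rewrite | github.com/byeol3325/code_studying | 프로그래머스/2/131704. 택배상자/택배상자.py | solution
-- ===== SOURCE A (Python) =====
-- from collections import deque
--
-- def solution(order):
--     answer = 0
--     n = len(order)
--     belt = deque([i for i in range(1, n+1)])
--     order = deque(order)
--
--     belt2 = []
--
--     while order:
--         if belt2 and belt2[-1] == order[0]:
--             order.popleft(); belt2.pop()
--             answer += 1
--         elif belt:
--             one = belt.popleft()
--             if one == order[0]:
--                 order.popleft()
--                 answer += 1
--             else:
--                 belt2.append(one)
--         else:
--             break
--     return answer
-- ===== SOURCE B (Python) =====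
-- def solution(order):
--     # Interval-stack algorithm: A's auxiliary pile always holds the not-yet-delivered
--     # boxes 1..M (M = largest box taken off the belt) in increasing order, so it can be
--     # represented as a stack of intervals of consecutive skipped boxes; no belt is built.
--     n = len(order)
--     stack = []          # intervals (a, b), a <= b, of skipped boxes; top has the largest boxes
--     M = 0               # largest box taken from the belt so far
--     answer = 0
--     for o in order:
--         if o > M:
--             if o > n:
--                 break                     # box o never arrives: belt drains, no match
--             if M + 1 <= o - 1:
--                 stack.append((M + 1, o - 1))
--             M = o
--         else:
--             if not stack or stack[-1][1] != o:
--                 break                     # o is buried (or already gone): no match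
--             a, b = stack[-1]
--             if a == b:
--                 stack.pop()
--             else:
--                 stack[-1] = (a, b - 1)
--         answer += 1
--     return answer
-- ===== Notes on version B (the rewrite author's own statement) =====
-- stated objective: faster
-- what changed: B replaces A's per-box belt/auxiliary-pile simulation with a compressed representation: since the waiting pile is always the increasing set of skipped boxes, B keeps only a stack of intervals of consecutive skipped boxes plus the largest box taken so far, never materializing the belt or pushing boxes one by one.
import Mathlib
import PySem

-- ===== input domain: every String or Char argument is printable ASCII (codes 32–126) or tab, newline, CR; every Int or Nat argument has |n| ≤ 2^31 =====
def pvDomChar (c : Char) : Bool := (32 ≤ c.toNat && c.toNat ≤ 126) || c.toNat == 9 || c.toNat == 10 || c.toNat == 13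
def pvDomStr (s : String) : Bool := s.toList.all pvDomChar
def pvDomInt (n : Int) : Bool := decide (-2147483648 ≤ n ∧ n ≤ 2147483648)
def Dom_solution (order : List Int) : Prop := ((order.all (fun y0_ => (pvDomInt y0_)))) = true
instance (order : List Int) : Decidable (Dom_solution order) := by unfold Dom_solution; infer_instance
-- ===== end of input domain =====

-- B replaces A's per-box belt/pile simulation with a compressed interval-stack
-- (intervals of consecutive skipped boxes plus the max box taken); no belt is built.

-- ===== PORT A =====
-- A's while loop; belt2 is the pile (top at head), order is consumed from the front.
def solLoopA : List Int → List Int → List Int → Int → Int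
  | _, _, [], ans => ans
  | belt, stack, o :: os, ans =>
    if stack.head? = some o then
      solLoopA belt stack.tail os (ans + 1)
    else
      match belt with
      | [] => ans
      | b :: bs =>
        if b = o then solLoopA bs stack os (ans + 1)
        else solLoopA bs (b :: stack) (o :: os) ans
  termination_by belt _ ord _ => ord.length + belt.length
  decreasing_by all_goals simp <;> omega

def solution (order : List Int) : Int :=
  solLoopA (PySem.List.pyRange 1 ((order.length : Int) + 1) 1) [] order 0

-- ===== PORT B =====
-- B's for-loop over order; state = interval stack (top at head), M = max box taken, ans.
def solLoopB (n : Int) : List Int → List (Int × Int) → Int → Int → Int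
  | [], _, _, ans => ans
  | o :: os, ivs, M, ans =>
    if M < o then
      if n < o then ans
      else solLoopB n os (if M + 1 ≤ o - 1 then (M + 1, o - 1) :: ivs else ivs) o (ans + 1)
    else
      match ivs with
      | [] => ans
      | (a, b) :: rest =>
        if b ≠ o then ans
        else solLoopB n os (if a = b then rest else (a, b - 1) :: rest) M (ans + 1)

def solution_alt (order : List Int) : Int :=
  solLoopB (order.length : Int) order [] 0 0

-- ===== PRECONDITION & SPEC =====
def Spec_solution (order : List Int) (out : Int) : Prop := out = solution_alt order
instance (order : List Int) (out : Int) : Decidable (Spec_solution order out) := by unfold Spec_solution; infer_instance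

-- ===== CLAIM (what is proved, stated in full; the proofs are below) =====
def Claim_equal_solution : Prop := ∀ (order : List Int), Dom_solution order → Spec_solution order (solution order)

-- ===== LEMMAS AND PROOFS =====

-- descList a b = [b, b-1, …, a] : the boxes of interval (a,b), top of A's pile first.
def descList (a b : Int) : List Int := (PySem.List.pyRange a (b + 1) 1).reverse

-- expand ivs = A's pile (top at head) represented by the interval stack.
def expand : List (Int × Int) → List Int
  | [] => []
  | (a, b) :: rest => descList a b ++ expand rest

lemma descList_nil {a b : Int} (h : b < a) : descList a b = [] := by
  unfold descList; rw [PySem.List.pyRange_one_eq_nil (by omega)]; rfl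

lemma descList_cons {a b : Int} (h : a ≤ b) : descList a b = b :: descList a (b - 1) := by
  unfold descList
  rw [PySem.List.pyRange_one_succ_right (by omega : a ≤ b)]
  simp

lemma descList_snoc {a b : Int} (h : a ≤ b) : descList a b = descList (a + 1) b ++ [a] := by
  unfold descList
  rw [PySem.List.pyRange_one_cons (by omega : a < b + 1)]
  simp

lemma mem_descList {a b x : Int} (h : x ∈ descList a b) : a ≤ x ∧ x ≤ b := by
  unfold descList at h
  rw [List.mem_reverse, PySem.List.mem_pyRange_one] at h
  omega

lemma mem_expand {ivs : List (Int × Int)} {M x : Int}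
    (hiv : ∀ p ∈ ivs, p.1 ≤ p.2 ∧ p.2 ≤ M) (hx : x ∈ expand ivs) : x ≤ M := by
  induction ivs with
  | nil => simp [expand] at hx
  | cons p rest ih =>
    obtain ⟨a, b⟩ := p
    simp only [expand] at hx
    rcases List.mem_append.mp hx with h | h
    · have h1 := mem_descList h
      have h2 := hiv (a, b) (by simp)
      simp at h2
      omega
    · exact ih (fun q hq => hiv q (by simp [hq])) h

-- Step lemmas for the two loops (the matches reduce only under eq_def).
lemma stepA_nil (belt st : List Int) (ans : Int) : solLoopA belt st [] ans = ans := by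
  rw [solLoopA.eq_def]

lemma stepA_pop (belt st os : List Int) (o ans : Int) (h : st.head? = some o) :
    solLoopA belt st (o :: os) ans = solLoopA belt st.tail os (ans + 1) := by
  rw [solLoopA.eq_def]; simp only [if_pos h]

lemma stepA_break (st os : List Int) (o ans : Int) (h : st.head? ≠ some o) :
    solLoopA [] st (o :: os) ans = ans := by
  rw [solLoopA.eq_def]; simp only [if_neg h]

lemma stepA_take (bs st os : List Int) (b o ans : Int) (h : st.head? ≠ some o) (hb : b = o) :
    solLoopA (b :: bs) st (o :: os) ans = solLoopA bs st os (ans + 1) := by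
  rw [solLoopA.eq_def]; simp only [if_neg h, if_pos hb]

lemma stepA_push (bs st os : List Int) (b o ans : Int) (h : st.head? ≠ some o) (hb : b ≠ o) :
    solLoopA (b :: bs) st (o :: os) ans = solLoopA bs (b :: st) (o :: os) ans := by
  rw [solLoopA.eq_def]; simp only [if_neg h, if_neg hb]

lemma stepB_nil (n M ans : Int) (ivs : List (Int × Int)) : solLoopB n [] ivs M ans = ans := rfl

lemma stepB_over (n o M ans : Int) (os : List Int) (ivs : List (Int × Int))
    (h : M < o) (h2 : n < o) : solLoopB n (o :: os) ivs M ans = ans := by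
  rw [solLoopB.eq_def]; simp only [if_pos h, if_pos h2]

lemma stepB_fresh (n o M ans : Int) (os : List Int) (ivs : List (Int × Int))
    (h : M < o) (h2 : ¬ n < o) :
    solLoopB n (o :: os) ivs M ans =
      solLoopB n os (if M + 1 ≤ o - 1 then (M + 1, o - 1) :: ivs else ivs) o (ans + 1) := by
  rw [solLoopB.eq_def]; simp only [if_pos h, if_neg h2]

lemma stepB_empty (n o M ans : Int) (os : List Int) (h : ¬ M < o) :
    solLoopB n (o :: os) [] M ans = ans := by
  rw [solLoopB.eq_def]; simp only [if_neg h]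

lemma stepB_top (n o M ans a b : Int) (os : List Int) (rest : List (Int × Int)) (h : ¬ M < o) :
    solLoopB n (o :: os) ((a, b) :: rest) M ans =
      if b ≠ o then ans
      else solLoopB n os (if a = b then rest else (a, b - 1) :: rest) M (ans + 1) := by
  rw [solLoopB.eq_def]; simp only [if_neg h]

-- Fail lemma: if the pile top is not o and o is nowhere on the belt, A drains
-- the belt without ever matching and returns ans.
lemma solLoopA_fail (o : Int) (os : List Int) (ans : Int) :
    ∀ (belt st : List Int), st.head? ≠ some o → (∀ x ∈ belt, x ≠ o) →
      solLoopA belt st (o :: os) ans = ans := by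
  intro belt
  induction belt with
  | nil => intro st hst _; exact stepA_break st os o ans hst
  | cons b bs ih =>
    intro st hst hbelt
    have hbo : b ≠ o := hbelt b (by simp)
    rw [stepA_push bs st os b o ans hst hbo]
    exact ih (b :: st) (by simp [hbo]) (fun x hx => hbelt x (by simp [hx]))

-- Skip lemma: to deliver a fresh box o (M < o ≤ n), A pops M+1,…,o from the belt,
-- piling up M+1,…,o-1, and delivers o.
lemma solLoopA_skip (n o : Int) (os : List Int) (hon : o ≤ n) :
    ∀ (k : Nat) (M : Int) (st : List Int) (ans : Int), M < o → (o - M - 1).toNat = k →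
      st.head? ≠ some o →
      solLoopA (PySem.List.pyRange (M + 1) (n + 1) 1) st (o :: os) ans =
        solLoopA (PySem.List.pyRange (o + 1) (n + 1) 1)
          (descList (M + 1) (o - 1) ++ st) os (ans + 1) := by
  intro k
  induction k with
  | zero =>
    intro M st ans hMo hk hst
    have hMo1 : M + 1 = o := by omega
    rw [PySem.List.pyRange_one_cons (by omega : M + 1 < n + 1)]
    rw [stepA_take _ _ _ _ _ _ hst hMo1, descList_nil (by omega), hMo1]
    simp
  | succ k ih =>
    intro M st ans hMo hk hst
    have hM1o : M + 1 ≠ o := by omega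
    rw [PySem.List.pyRange_one_cons (by omega : M + 1 < n + 1)]
    rw [stepA_push _ _ _ _ _ _ hst hM1o]
    have := ih (M + 1) ((M + 1) :: st) ans (by omega) (by omega) (by simp [hM1o])
    rw [this]
    congr 1
    rw [descList_snoc (by omega : M + 1 ≤ o - 1)]
    simp

-- Main bridge: A's loop from state (belt = M+1..n, pile = expand ivs) equals B's loop.
lemma bridge (n : Int) (os : List Int) :
    ∀ (ivs : List (Int × Int)) (M ans : Int), 0 ≤ M → M ≤ n →
      (∀ p ∈ ivs, p.1 ≤ p.2 ∧ p.2 ≤ M) →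
      solLoopA (PySem.List.pyRange (M + 1) (n + 1) 1) (expand ivs) os ans =
        solLoopB n os ivs M ans := by
  induction os with
  | nil => intro ivs M ans _ _ _; rw [stepA_nil, stepB_nil]
  | cons o os ih =>
    intro ivs M ans hM0 hMn hiv
    have hhead : ∀ y, M < y → (expand ivs).head? ≠ some y := by
      intro y hy hc
      have hmem : y ∈ expand ivs := by
        cases h : expand ivs with
        | nil => rw [h] at hc; simp at hc
        | cons z zs => rw [h] at hc; simp at hc; simp [hc]
      have := mem_expand hiv hmem
      omega
    by_cases hMo : M < o
    · by_cases hno : n < o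
      · -- box o never arrives: A drains the belt, both return ans
        rw [stepB_over n o M ans os ivs hMo hno]
        apply solLoopA_fail
        · exact hhead o hMo
        · intro x hx
          have := (PySem.List.mem_pyRange_one.mp hx)
          omega
      · rw [stepB_fresh n o M ans os ivs hMo hno]
        rw [solLoopA_skip n o os (by omega) (o - M - 1).toNat M (expand ivs) ans hMo rfl
            (hhead o hMo)]
        have hexp : descList (M + 1) (o - 1) ++ expand ivs =
            expand (if M + 1 ≤ o - 1 then (M + 1, o - 1) :: ivs else ivs) := by
          split_ifs with hle
          · simp [expand]
          · rw [descList_nil (by omega)]; simp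
        rw [hexp]
        apply ih
        · omega
        · omega
        · intro p hp
          split_ifs at hp with hle
          · rcases List.mem_cons.mp hp with h | h
            · subst h; exact ⟨by simp; omega, by simp⟩
            · have := hiv p h; constructor <;> [exact this.1; omega]
          · have := hiv p hp; constructor <;> [exact this.1; omega]
    · -- o ≤ M : o must be the top of A's pile, i.e. the top interval's upper end
      cases hivs : ivs with
      | nil =>
        -- empty pile: everything ≤ M was delivered; A drains the belt, both return ans
        subst hivs
        rw [stepB_empty n o M ans os hMo]
        apply solLoopA_fail
        · simp [expand]
        · intro x hx
          have := PySem.List.mem_pyRange_one.mp hx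
          omega
      | cons p rest =>
        obtain ⟨a, b⟩ := p
        subst hivs
        have hab : a ≤ b ∧ b ≤ M := by
          have := hiv (a, b) (by simp); simpa using this
        have hexpand : expand ((a, b) :: rest) = b :: (descList a (b - 1) ++ expand rest) := by
          simp only [expand]
          rw [descList_cons hab.1]
          simp
        rw [stepB_top n o M ans a b os rest hMo]
        by_cases hbo : b = o
        · -- top matches: A pops it, B shrinks the top interval
          rw [if_neg (by simp [hbo])]
          rw [hexpand, stepA_pop _ _ _ _ _ (by simp [hbo]), List.tail_cons]
          have hexp2 : descList a (b - 1) ++ expand rest =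
              expand (if a = b then rest else (a, b - 1) :: rest) := by
            split_ifs with hae
            · rw [descList_nil (by omega)]; simp
            · simp [expand]
          rw [hexp2]
          apply ih
          · omega
          · omega
          · intro q hq
            split_ifs at hq with hae
            · exact hiv q (by simp [hq])
            · rcases List.mem_cons.mp hq with h | h
              · subst h; exact ⟨by simp; omega, by simp; omega⟩
              · exact hiv q (by simp [h])
        · -- top does not match: A drains the belt, both return ans
          rw [if_pos hbo]
          apply solLoopA_fail
          · rw [hexpand]; simp [hbo]
          · intro x hx
            have := PySem.List.mem_pyRange_one.mp hx
            omega

-- ===== VERDICT (by name: the statement is the Claim_ definition above) =====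
theorem solution_spec : Claim_equal_solution := by
  intro order _
  unfold Spec_solution solution solution_alt
  have := bridge (order.length : Int) order [] 0 0 (by omega) (by positivity) (by simp)
  simpa [expand] using this
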